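-- pv_equiv track=rewrite | github.com/felixApellSkjutar/AdventOfCode | AdventOfCode/2023/7.py | replacements
-- ===== SOURCE A (Python) =====
-- def replacements(hand):
--     if hand == "":
--         return [""]
--
--     return [
--         x + y
--         for x in ("23456789TQKA" if hand[0] == "J" else hand[0])
--         for y in replacements(hand[1:])
--     ]
-- ===== SOURCE B (Python) =====
-- def replacements(hand):
--     # Iterative back-to-front: build the suffix variant list once per position
--     # instead of recomputing replacements(hand[1:]) for every candidate card.
--     suffixes = [""]
--     for ch in reversed(hand):
--         options = "23456789TQKA" if ch == "J" else ch
--         suffixes = [x + y for x in options for y in suffixes]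
--     return suffixes
-- ===== Notes on version B (the rewrite author's own statement) =====
-- stated objective: faster
-- what changed: Replaced A's recursion, which re-evaluates replacements(hand[1:]) once per candidate card at each position, by a single backwards iterative pass that builds each suffix variant list exactly once.
import Mathlib
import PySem

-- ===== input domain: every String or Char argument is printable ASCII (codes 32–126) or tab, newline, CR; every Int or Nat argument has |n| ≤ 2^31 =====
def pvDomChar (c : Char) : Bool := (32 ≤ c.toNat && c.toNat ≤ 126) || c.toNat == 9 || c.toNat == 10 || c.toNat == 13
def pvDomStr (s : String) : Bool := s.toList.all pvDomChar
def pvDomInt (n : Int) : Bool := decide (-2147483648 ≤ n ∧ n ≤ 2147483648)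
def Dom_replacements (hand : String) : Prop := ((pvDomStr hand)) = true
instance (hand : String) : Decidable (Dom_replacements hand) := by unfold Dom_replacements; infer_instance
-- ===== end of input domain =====

-- B replaces A's recursion (which recomputes replacements(hand[1:]) for every candidate card)
-- by a single backwards pass that builds the suffix list once per position; objective: faster.
-- Strings are ported via List Char (String.mk at the end), since Lean's String.append is kernel-opaque.

-- ===== PORT A =====
-- candidate cards for one position: "23456789TQKA" if the card is 'J', else the card itself
def pvChoices (c : Char) : List Char := if c = 'J' then "23456789TQKA".toList else [c]

-- A's recursion: base case [""], then [x + y for x in choices for y in replacements(hand[1:])]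
def pvRepA : List Char → List (List Char)
  | [] => [[]]
  | c :: rest => (pvChoices c).flatMap (fun x => (pvRepA rest).map (fun y => x :: y))

def replacements (hand : String) : List String := (pvRepA hand.toList).map String.mk

-- ===== PORT B =====
-- B's loop body: suffixes = [x + y for x in options for y in suffixes]
def pvStep (acc : List (List Char)) (c : Char) : List (List Char) :=
  (pvChoices c).flatMap (fun x => acc.map (fun y => x :: y))

def replacements_alt (hand : String) : List String :=
  (hand.toList.reverse.foldl pvStep [[]]).map String.mk

-- ===== PRECONDITION & SPEC =====
def Spec_replacements (hand : String) (out : List String) : Prop := out = replacements_alt hand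
instance (hand : String) (out : List String) : Decidable (Spec_replacements hand out) := by unfold Spec_replacements; infer_instance

-- ===== CLAIM (what is proved, stated in full; the proofs are below) =====
def Claim_equal_replacements : Prop := ∀ (hand : String), Dom_replacements hand → Spec_replacements hand (replacements hand)

-- ===== LEMMAS AND PROOFS =====
theorem pvFold_eq_repA (l : List Char) : l.reverse.foldl pvStep [[]] = pvRepA l := by
  induction l with
  | nil => rfl
  | cons c rest ih =>
      simp [List.foldl_append, ih, pvStep, pvRepA]

-- ===== VERDICT (by name: the statement is the Claim_ definition above) =====
theorem replacements_spec : Claim_equal_replacements := by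
  intro hand _
  unfold Spec_replacements replacements replacements_alt
  rw [pvFold_eq_repA]
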